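-- pv_equiv track=rewrite | github.com/rovi1013/masterarbeit | eval-gmt/scripts/create_gmt_summary.py | build_window_records
-- ===== SOURCE A (Python) =====
-- from typing import Any, Callable, Dict, List, Tuple, Union
--
-- def build_window_records(summary: dict[str, Any]) -> dict[str, list[dict[str, Any]]]:
--     out: dict[str, list[dict[str, Any]]] = {}
--     for r in summary.get("records", []):
--         w = r.get("window")
--         if not w:
--             continue
--         out.setdefault(str(w), []).append(r)
--     return out
-- ===== SOURCE B (Python) =====
-- def build_window_records(summary: dict[str, any]) -> dict[str, list[dict[str, any]]]:
--     records = summary.get("records", [])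
--     keys: list[str] = []
--     for r in records:
--         w = r.get("window")
--         if w and str(w) not in keys:
--             keys.append(str(w))
--     return {k: [r for r in records if r.get("window") and str(r.get("window")) == k]
--             for k in keys}
-- ===== Notes on version B (the rewrite author's own statement) =====
-- stated objective: alternative
-- what changed: Replaces A's one-pass setdefault hash-scatter with a two-phase decomposition: first collect the distinct window keys in first-appearance order, then build each group by a per-key filter over the records (dict comprehension).
import Mathlib
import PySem

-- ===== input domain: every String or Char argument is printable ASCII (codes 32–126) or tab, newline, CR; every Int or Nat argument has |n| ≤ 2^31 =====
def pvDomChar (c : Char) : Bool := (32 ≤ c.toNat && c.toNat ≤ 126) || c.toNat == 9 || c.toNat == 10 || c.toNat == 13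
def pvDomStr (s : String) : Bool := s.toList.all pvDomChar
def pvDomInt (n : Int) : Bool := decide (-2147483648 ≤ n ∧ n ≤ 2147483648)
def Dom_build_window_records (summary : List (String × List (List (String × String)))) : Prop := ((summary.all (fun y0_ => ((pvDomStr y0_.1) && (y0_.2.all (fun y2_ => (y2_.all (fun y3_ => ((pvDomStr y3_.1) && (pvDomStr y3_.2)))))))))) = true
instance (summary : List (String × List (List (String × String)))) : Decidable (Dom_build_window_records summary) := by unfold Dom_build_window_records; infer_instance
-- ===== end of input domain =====

-- B replaces A's one-pass setdefault grouping by a two-phase decomposition (distinct keys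
-- in first-appearance order, then one filter per key); same return value, objective: alternative.

-- ===== PORT A =====
-- out.setdefault(str(w), []).append(r): append r to the existing group, else insert a new key at the end
def bwrStep (out : List (String × List (List (String × String)))) (r : List (String × String)) :
    List (String × List (List (String × String))) :=
  match r.lookup "window" with
  | none => out
  | some w =>
    if w = "" then out
    else if (out.lookup w).isSome then
      out.map (fun kv => if kv.1 = w then (kv.1, kv.2 ++ [r]) else kv)
    else out ++ [(w, [r])]

def build_window_records (summary : List (String × List (List (String × String)))) : List (String × List (List (String × String))) :=
  ((summary.lookup "records").getD []).foldl bwrStep []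

-- ===== PORT B =====
-- first pass: distinct truthy window keys in first-appearance order
def bwrKeysStep (keys : List String) (r : List (String × String)) : List String :=
  match r.lookup "window" with
  | none => keys
  | some w => if w ≠ "" ∧ w ∉ keys then keys ++ [w] else keys

-- predicate of B's comprehension: r.get("window") truthy and equal to k
def bwrHasKey (k : String) (r : List (String × String)) : Bool :=
  match r.lookup "window" with
  | none => false
  | some w => w ≠ "" && w == k

def build_window_records_alt (summary : List (String × List (List (String × String)))) : List (String × List (List (String × String))) :=
  let records := (summary.lookup "records").getD []
  let keys := records.foldl bwrKeysStep []
  keys.map (fun k => (k, records.filter (bwrHasKey k)))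

-- ===== PRECONDITION & SPEC =====
def Spec_build_window_records (summary : List (String × List (List (String × String)))) (out : List (String × List (List (String × String)))) : Prop := out = build_window_records_alt summary
instance (summary : List (String × List (List (String × String)))) (out : List (String × List (List (String × String)))) : Decidable (Spec_build_window_records summary out) := by unfold Spec_build_window_records; infer_instance

-- ===== CLAIM (what is proved, stated in full; the proofs are below) =====
def Claim_equal_build_window_records : Prop := ∀ (summary : List (String × List (List (String × String)))), Dom_build_window_records summary → Spec_build_window_records summary (build_window_records summary)

-- ===== LEMMAS AND PROOFS =====

-- the effective grouping key of a record: its "window" value if present and truthy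
def bwrKey? (r : List (String × String)) : Option String :=
  match r.lookup "window" with
  | none => none
  | some w => if w = "" then none else some w

-- distinct new keys of rs in first-appearance order, excluding `seen`
def bwrDK (seen : List String) : List (List (String × String)) → List String
  | [] => []
  | r :: rs =>
    match bwrKey? r with
    | none => bwrDK seen rs
    | some w => if w ∈ seen then bwrDK seen rs else w :: bwrDK (seen ++ [w]) rs

lemma bwrHasKey_eq (k : String) (r : List (String × String)) :
    bwrHasKey k r = (bwrKey? r == some k) := by
  unfold bwrHasKey bwrKey?
  cases h : r.lookup "window" with
  | none => rfl
  | some w => by_cases hw : w = "" <;> simp [hw]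

-- A's loop body through the effective key
lemma bwrStep_eq (acc : List (String × List (List (String × String)))) (r : List (String × String)) :
    bwrStep acc r =
      match bwrKey? r with
      | none => acc
      | some w =>
        if (acc.lookup w).isSome then
          acc.map (fun kv => if kv.1 = w then (kv.1, kv.2 ++ [r]) else kv)
        else acc ++ [(w, [r])] := by
  unfold bwrStep bwrKey?
  cases h : r.lookup "window" with
  | none => rfl
  | some w => by_cases hw : w = "" <;> simp [hw]

-- B's first-pass body through the effective key
lemma bwrKeysStep_eq (ks : List String) (r : List (String × String)) :
    bwrKeysStep ks r =
      match bwrKey? r with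
      | none => ks
      | some w => if w ∈ ks then ks else ks ++ [w] := by
  unfold bwrKeysStep bwrKey?
  cases h : r.lookup "window" with
  | none => rfl
  | some w =>
    by_cases hw : w = "" <;> by_cases hm : w ∈ ks <;> simp [hw, hm]

lemma bwrDK_not_mem_seen {seen : List String} {rs : List (List (String × String))} {k : String}
    (h : k ∈ bwrDK seen rs) : k ∉ seen := by
  induction rs generalizing seen with
  | nil => simp [bwrDK] at h
  | cons r rs ih =>
    unfold bwrDK at h
    cases hk : bwrKey? r with
    | none => rw [hk] at h; exact ih h
    | some w =>
      rw [hk] at h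
      by_cases hw : w ∈ seen
      · simp only [if_pos hw] at h; exact ih h
      · simp only [if_neg hw, List.mem_cons] at h
        rcases h with h | h
        · exact h ▸ hw
        · intro hks; exact (ih h) (List.mem_append_left _ hks)

-- B's first pass computes `ks ++` the new distinct keys (seen set = ks itself)
lemma bwrKeys_eq_dk (rs : List (List (String × String))) (ks : List String) :
    rs.foldl bwrKeysStep ks = ks ++ bwrDK ks rs := by
  induction rs generalizing ks with
  | nil => simp [bwrDK]
  | cons r rs ih =>
    rw [List.foldl_cons, bwrKeysStep_eq]
    unfold bwrDK
    cases hk : bwrKey? r with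
    | none => exact ih ks
    | some w =>
      by_cases hm : w ∈ ks
      · simp only [if_pos hm]; exact ih ks
      · simp only [if_neg hm]
        rw [ih (ks ++ [w])]
        simp

-- invariant of A's fold: starting from an accumulator acc with distinct keys,
-- the fold appends each record to its group and lists new keys afterwards
lemma bwrFold_inv (rs : List (List (String × String)))
    (acc : List (String × List (List (String × String))))
    (hnd : (acc.map Prod.fst).Nodup) :
    rs.foldl bwrStep acc =
      acc.map (fun kv => (kv.1, kv.2 ++ rs.filter (fun r => bwrKey? r == some kv.1)))
      ++ (bwrDK (acc.map Prod.fst) rs).map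
          (fun k => (k, rs.filter (fun r => bwrKey? r == some k))) := by
  induction rs generalizing acc with
  | nil => simp [bwrDK]
  | cons r rs ih =>
    rw [List.foldl_cons, bwrStep_eq]
    unfold bwrDK
    cases hk : bwrKey? r with
    | none =>
      rw [ih acc hnd]
      have hfilt : ∀ k, (r :: rs).filter (fun r' => bwrKey? r' == some k)
          = rs.filter (fun r' => bwrKey? r' == some k) := by
        intro k; simp [hk]
      simp only [hfilt]
    | some w =>
      have hlk : (acc.lookup w).isSome = true ↔ w ∈ acc.map Prod.fst := by simp
      dsimp only
      by_cases hm : w ∈ acc.map Prod.fst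
      · -- existing key: group updated in place
        rw [if_pos (hlk.mpr hm), if_pos hm]
        set acc' := acc.map (fun kv => if kv.1 = w then (kv.1, kv.2 ++ [r]) else kv) with hacc'
        have hkeys : acc'.map Prod.fst = acc.map Prod.fst := by
          rw [hacc', List.map_map]
          apply List.map_congr_left
          intro kv _
          by_cases h1 : kv.1 = w <;> simp [h1]
        rw [ih acc' (hkeys ▸ hnd), hkeys]
        congr 1
        · rw [hacc', List.map_map]
          apply List.map_congr_left
          intro kv _
          by_cases h1 : kv.1 = w
          · simp [h1, hk, List.append_assoc]
          · simp [h1, hk, Ne.symm h1]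
        · apply List.map_congr_left
          intro k hkmem
          have hne : k ≠ w := fun h => (bwrDK_not_mem_seen hkmem) (h ▸ hm)
          simp [hk, Ne.symm hne]
      · -- new key: appended at the end
        rw [if_neg (by simp [hlk, hm]), if_neg hm]
        have hnd' : ((acc ++ [(w, [r])]).map Prod.fst).Nodup := by
          simp only [List.map_append, List.map_cons, List.map_nil]
          exact List.Nodup.append hnd (List.nodup_singleton w)
            (by simpa [List.disjoint_singleton] using hm)
        rw [ih _ hnd']
        have hkeys : (acc ++ [(w, [r])]).map Prod.fst = acc.map Prod.fst ++ [w] := by simp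
        rw [hkeys]
        simp only [List.map_append, List.map_cons, List.map_nil, List.append_assoc]
        congr 1
        · apply List.map_congr_left
          intro kv hkv
          have hne : kv.1 ≠ w := fun h => hm (h ▸ List.mem_map_of_mem hkv)
          simp [hk, Ne.symm hne]
        · simp [List.filter_cons, hk]
          intro a ha h
          subst h
          exact (bwrDK_not_mem_seen ha) (List.mem_append_right _ (List.mem_singleton_self w))

-- ===== VERDICT (by name: the statement is the Claim_ definition above) =====
theorem build_window_records_spec : Claim_equal_build_window_records := by
  intro summary _
  unfold Spec_build_window_records build_window_records build_window_records_alt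
  dsimp only
  set rs := (summary.lookup "records").getD [] with hrs
  rw [bwrFold_inv rs [] (by simp), bwrKeys_eq_dk rs []]
  simp only [List.map_nil, List.nil_append]
  apply List.map_congr_left
  intro k _
  refine congrArg (fun l => (k, l)) ?_
  exact List.filter_congr (fun r _ => (bwrHasKey_eq k r).symm)
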